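-- pv_equiv track=rewrite | github.com/mpartel/keras-bert-ner | common.py | combine_sentences
-- ===== SOURCE A (Python) =====
-- def combine_sentences(lines, tags, lengths, max_seq):
--     lines_in_sample = []
--     new_lines = []
--     new_tags = []
--
--     for i, line in enumerate(lines):
--         line_numbers = [i]
--         new_line = []
--         new_line.extend(line)
--         new_tag = []
--         new_tag.extend(tags[i])
--         j = 1
--         linelen = len(lines[(i+j)%len(lines)])
--         while (len(new_line) + linelen) < max_seq-2:
--             new_line.append('[SEP]')
--             new_tag.append('[SEP]')
--             new_line.extend(lines[(i+j)%len(lines)])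
--             new_tag.extend(tags[(i+j)%len(tags)])
--             line_numbers.append((i+j)%len(lines))
--             j += 1
--             linelen = len(lines[(i+j)%len(lines)])
--         new_lines.append(new_line)
--         new_tags.append(new_tag)
--         lines_in_sample.append(line_numbers)
--     return new_lines, new_tags, lines_in_sample
-- ===== SOURCE B (Python) =====
-- def combine_sentences(lines, tags, lengths, max_seq):
--     n = len(lines)
--     new_lines, new_tags, samples = [], [], []
--     for i in range(n):
--         # pass 1: scalar budget loop -- how many further cyclic lines still fit
--         total = len(lines[i])
--         k = 0
--         while total + len(lines[(i + k + 1) % n]) < max_seq - 2: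
--             total += 1 + len(lines[(i + k + 1) % n])
--             k += 1
--         # pass 2: assemble from offsets 1..k, each parallel list indexed cyclically by its own length
--         line = list(lines[i])
--         tag = list(tags[i])
--         for j in range(1, k + 1):
--             line += ['[SEP]'] + lines[(i + j) % len(lines)]
--             tag += ['[SEP]'] + tags[(i + j) % len(tags)]
--         new_lines.append(line)
--         new_tags.append(tag)
--         samples.append([i] + [(i + j) % n for j in range(1, k + 1)])
--     return new_lines, new_tags, samples
-- ===== Notes on version B (the rewrite author's own statement) =====
-- stated objective: alternative
-- what changed: Per start index, A grows new_line/new_tag inside a single while loop whose guard re-measures len(new_line); B first runs a scalar budget loop that only counts how many further cyclic lines fit, then a separate build pass assembles tokens, tags and the sample index list from the offset range 1..k. Pre_ excludes only the inputs where A raises IndexError (tags shorter than lines).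
import Mathlib
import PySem

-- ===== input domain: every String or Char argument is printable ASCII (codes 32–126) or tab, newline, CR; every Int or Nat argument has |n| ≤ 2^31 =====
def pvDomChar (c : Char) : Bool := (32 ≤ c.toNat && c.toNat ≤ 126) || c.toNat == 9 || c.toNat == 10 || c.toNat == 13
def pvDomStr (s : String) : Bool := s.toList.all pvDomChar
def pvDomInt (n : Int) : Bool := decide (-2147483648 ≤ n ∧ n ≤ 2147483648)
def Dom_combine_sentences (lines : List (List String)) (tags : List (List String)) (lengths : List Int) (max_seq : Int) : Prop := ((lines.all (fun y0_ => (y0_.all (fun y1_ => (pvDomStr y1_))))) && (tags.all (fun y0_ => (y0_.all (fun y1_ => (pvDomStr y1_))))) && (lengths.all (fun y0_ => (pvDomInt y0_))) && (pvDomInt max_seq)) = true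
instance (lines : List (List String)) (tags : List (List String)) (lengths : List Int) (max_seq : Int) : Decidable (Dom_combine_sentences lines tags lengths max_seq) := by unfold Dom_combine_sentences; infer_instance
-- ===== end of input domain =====

-- B replaces A's grow-the-list-and-measure-it while loop by a count-then-build decomposition
-- (a scalar budget loop counts how many further cyclic lines fit, then a separate pass assembles
-- tokens/tags/sample indices from the offset range); objective: alternative, same cost.
-- Both loop ports take a `fuel : Nat` argument solely to make the recursion structural; each
-- iteration grows the guarded quantity by at least 1, so fuel `max_seq.toNat + 1` is never exhausted.

-- ===== PORT A =====
-- A's inner while loop: grows new_line/new_tag/line_numbers, guard reads len(new_line)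
def aLoop (lines tags : List (List String)) (max_seq : Int) (i : Nat) (fuel j : Nat)
    (nums : List Int) (nl nt : List String) : List Int × List String × List String :=
  match fuel with
  | 0 => (nums, nl, nt)
  | fuel + 1 =>
    if (nl.length : Int) + ((lines.getD ((i + j) % lines.length) []).length : Int) < max_seq - 2 then
      aLoop lines tags max_seq i fuel (j + 1)
        (nums ++ [(((i + j) % lines.length : Nat) : Int)])
        (nl ++ ["[SEP]"] ++ lines.getD ((i + j) % lines.length) [])
        (nt ++ ["[SEP]"] ++ tags.getD ((i + j) % tags.length) [])
    else (nums, nl, nt)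

def combine_sentences (lines : List (List String)) (tags : List (List String)) (lengths : List Int) (max_seq : Int) : List (List String) × List (List String) × List (List Int) :=
  (List.range lines.length).foldl
    (fun acc i =>
      let r := aLoop lines tags max_seq i (max_seq.toNat + 1) 1 [(i : Int)] (lines.getD i []) (tags.getD i [])
      (acc.1 ++ [r.2.1], acc.2.1 ++ [r.2.2], acc.2.2 ++ [r.1]))
    ([], [], [])

-- ===== PORT B =====
-- B pass 1: the scalar budget while loop; `k` counts the further cyclic lines that fit
def bCount (lines : List (List String)) (max_seq : Int) (i k : Nat) (total : Int) (fuel : Nat) : Nat :=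
  match fuel with
  | 0 => k
  | fuel + 1 =>
    let step : Int := ((lines.getD ((i + k + 1) % lines.length) []).length : Int)
    if total + step < max_seq - 2 then
      bCount lines max_seq i (k + 1) (total + 1 + step) fuel
    else k

-- B pass 2: assemble tokens and tags from the chosen offsets, each list by its own modulus
def bBuild (lines tags : List (List String)) (i : Nat) (js : List Nat) (line tag : List String) : List String × List String :=
  match js with
  | [] => (line, tag)
  | j :: rest =>
      bBuild lines tags i rest (line ++ ["[SEP]"] ++ lines.getD ((i + j) % lines.length) [])
        (tag ++ ["[SEP]"] ++ tags.getD ((i + j) % tags.length) [])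

def combine_sentences_alt (lines : List (List String)) (tags : List (List String)) (lengths : List Int) (max_seq : Int) : List (List String) × List (List String) × List (List Int) :=
  (List.range lines.length).foldl
    (fun acc i =>
      let k := bCount lines max_seq i 0 ((lines.getD i []).length : Int) (max_seq.toNat + 1)
      let js := List.range' 1 k
      let p := bBuild lines tags i js (lines.getD i []) (tags.getD i [])
      let nums := (i :: js.map (fun j => (i + j) % lines.length)).map Int.ofNat
      (acc.1 ++ [p.1], acc.2.1 ++ [p.2], acc.2.2 ++ [nums]))
    ([], [], [])

-- ===== PRECONDITION & SPEC =====
-- Pre_ excludes exactly the inputs on which Python A raises IndexError: tags shorter than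
-- lines (tags[i] out of range for some start index i).
def Pre_combine_sentences (lines : List (List String)) (tags : List (List String)) (lengths : List Int) (max_seq : Int) : Prop :=
  lines.length ≤ tags.length
instance (lines : List (List String)) (tags : List (List String)) (lengths : List Int) (max_seq : Int) : Decidable (Pre_combine_sentences lines tags lengths max_seq) := by unfold Pre_combine_sentences; infer_instance

def pvWitness_combine_sentences : List (List String) × List (List String) × List Int × Int :=
  ([["a"], ["bb", "c"]], [["O"], ["B", "O"]], [], 9)

def Spec_combine_sentences (lines : List (List String)) (tags : List (List String)) (lengths : List Int) (max_seq : Int) (out : List (List String) × List (List String) × List (List Int)) : Prop := out = combine_sentences_alt lines tags lengths max_seq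
instance (lines : List (List String)) (tags : List (List String)) (lengths : List Int) (max_seq : Int) (out : List (List String) × List (List String) × List (List Int)) : Decidable (Spec_combine_sentences lines tags lengths max_seq out) := by unfold Spec_combine_sentences; infer_instance

-- ===== CLAIM (what is proved, stated in full; the proofs are below) =====
def Claim_equal_combine_sentences : Prop := ∀ (lines : List (List String)) (tags : List (List String)) (lengths : List Int) (max_seq : Int), Dom_combine_sentences lines tags lengths max_seq → Pre_combine_sentences lines tags lengths max_seq → Spec_combine_sentences lines tags lengths max_seq (combine_sentences lines tags lengths max_seq)

-- ===== LEMMAS AND PROOFS =====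

-- proof helper: the pure count of accepted offsets (not part of either port)
def cfRel (lines : List (List String)) (max_seq : Int) (i k : Nat) (total : Int) (fuel : Nat) : Nat :=
  match fuel with
  | 0 => 0
  | fuel + 1 =>
    let step : Int := ((lines.getD ((i + k + 1) % lines.length) []).length : Int)
    if total + step < max_seq - 2 then
      1 + cfRel lines max_seq i (k + 1) (total + 1 + step) fuel
    else 0

-- B's accumulator loop returns start + pure count
theorem bCount_eq_cfRel (lines : List (List String)) (ms : Int) (i : Nat) :
    ∀ (fuel k : Nat) (total : Int),
      bCount lines ms i k total fuel = k + cfRel lines ms i k total fuel := by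
  intro fuel
  induction fuel with
  | zero => intro k total; simp [bCount, cfRel]
  | succ fuel ih =>
      intro k total
      rw [bCount, cfRel]
      by_cases hg : total + ((lines.getD ((i + k + 1) % lines.length) []).length : Int) < ms - 2
      · rw [if_pos hg, if_pos hg, ih]; omega
      · rw [if_neg hg, if_neg hg]; simp

-- A's inner loop at j = k+1 equals B's count followed by B's build pass over the offset
-- segment [k+1, …, k + count]: the scalar `total` tracks len(new_line).
theorem aLoop_eq_alt (lines tags : List (List String)) (ms : Int) (i : Nat) :
    ∀ (fuel k : Nat) (nums : List Int) (nl nt : List String),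
      aLoop lines tags ms i fuel (k + 1) nums nl nt =
        (nums ++ (List.range' (k + 1) (cfRel lines ms i k (nl.length : Int) fuel)).map
            (fun j => (((i + j) % lines.length : Nat) : Int)),
         bBuild lines tags i (List.range' (k + 1) (cfRel lines ms i k (nl.length : Int) fuel)) nl nt) := by
  intro fuel
  induction fuel with
  | zero => intro k nums nl nt; simp [aLoop, cfRel, bBuild]
  | succ fuel ih =>
      intro k nums nl nt
      rw [aLoop, cfRel]
      simp only [show i + (k + 1) = i + k + 1 from rfl]
      by_cases hg : (nl.length : Int) + ((lines.getD ((i + k + 1) % lines.length) []).length : Int) < ms - 2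
      · rw [if_pos hg, if_pos hg, ih]
        have hlen : (((nl ++ ["[SEP]"] ++ lines.getD ((i + k + 1) % lines.length) []).length : Nat) : Int)
            = (nl.length : Int) + 1 + ((lines.getD ((i + k + 1) % lines.length) []).length : Int) := by
          simp [List.length_append]; ring
        rw [hlen, Nat.add_comm 1 _, List.range'_succ, List.map_cons]
        conv_rhs => rw [bBuild]
        simp only [show i + (k + 1) = i + k + 1 from rfl, show k + 1 + 1 = k + 2 from rfl]
        simp [List.append_assoc]
      · rw [if_neg hg, if_neg hg]
        simp [bBuild]

-- ===== VERDICT (by name: the statement is the Claim_ definition above) =====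
theorem combine_sentences_spec : Claim_equal_combine_sentences := by
  intro lines tags lengths max_seq _ _
  unfold Spec_combine_sentences combine_sentences combine_sentences_alt
  congr 1
  funext acc i
  have hl := aLoop_eq_alt lines tags max_seq i (max_seq.toNat + 1) 0
    [(i : Int)] (lines.getD i []) (tags.getD i [])
  simp only [Nat.zero_add, Nat.add_zero] at hl
  rw [hl, bCount_eq_cfRel]
  simp only [Nat.zero_add, Int.ofNat_eq_natCast, List.map_cons, List.map_map, Function.comp_def,
    List.singleton_append]
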